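-- pv_equiv track=rewrite | github.com/enoelromo/Coding-competition | suburbia_systematic.py | get_cheapest_type
-- ===== SOURCE A (Python) =====
-- ANTENNA_TYPES = {
--     'Nano': {'range': 50, 'capacity': 200, 'cost_on': 5_000},
--     'Spot': {'range': 100, 'capacity': 800, 'cost_on': 15_000},
--     'Density': {'range': 150, 'capacity': 5_000, 'cost_on': 30_000},
--     'MaxRange': {'range': 400, 'capacity': 3_500, 'cost_on': 40_000}
-- }
--
-- def get_max_pop(b):
--     return max(b['populationPeakHours'], b['populationOffPeakHours'], b['populationNight'])
--
-- def dist_sq(x1, y1, x2, y2):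
--     return (x1 - x2) ** 2 + (y1 - y2) ** 2
--
-- def get_cheapest_type(x, y, bids, bmap):
--     """Find cheapest antenna type."""
--     blds = [bmap[bid] for bid in bids]
--     total_pop = sum(get_max_pop(b) for b in blds)
--
--     for atype in ['Nano', 'Spot', 'Density', 'MaxRange']:
--         specs = ANTENNA_TYPES[atype]
--         if specs['capacity'] < total_pop:
--             continue
--
--         r2 = specs['range'] ** 2
--         if all(dist_sq(x, y, b['x'], b['y']) <= r2 for b in blds):
--             return atype
--
--     return None
-- ===== SOURCE B (Python) =====
-- ANTENNA_TYPES = {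
--     'Nano': {'range': 50, 'capacity': 200, 'cost_on': 5_000},
--     'Spot': {'range': 100, 'capacity': 800, 'cost_on': 15_000},
--     'Density': {'range': 150, 'capacity': 5_000, 'cost_on': 30_000},
--     'MaxRange': {'range': 400, 'capacity': 3_500, 'cost_on': 40_000}
-- }
--
-- def get_cheapest_type(x, y, bids, bmap):
--     """Find cheapest antenna type: one aggregate pass over buildings, then pick
--     the min-cost type whose scalar specs cover the aggregates."""
--     total_pop = 0
--     max_d2 = 0
--     for bid in bids:
--         b = bmap[bid]
--         total_pop += max(b['populationPeakHours'], b['populationOffPeakHours'], b['populationNight'])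
--         d2 = (x - b['x']) ** 2 + (y - b['y']) ** 2
--         if d2 > max_d2:
--             max_d2 = d2
--     best = None
--     for name, specs in ANTENNA_TYPES.items():
--         if specs['capacity'] >= total_pop and specs['range'] ** 2 >= max_d2:
--             if best is None or specs['cost_on'] < best[1]:
--                 best = (name, specs['cost_on'])
--     return best[0] if best is not None else None
-- ===== Notes on version B (the rewrite author's own statement) =====
-- stated objective: alternative
-- what changed: Instead of re-scanning all buildings for each antenna type, B computes the two aggregates (total peak population and max squared distance) in one pass over the buildings, then picks the minimum-cost type among the four fixed types whose scalar specs cover those aggregates.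
import Mathlib
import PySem

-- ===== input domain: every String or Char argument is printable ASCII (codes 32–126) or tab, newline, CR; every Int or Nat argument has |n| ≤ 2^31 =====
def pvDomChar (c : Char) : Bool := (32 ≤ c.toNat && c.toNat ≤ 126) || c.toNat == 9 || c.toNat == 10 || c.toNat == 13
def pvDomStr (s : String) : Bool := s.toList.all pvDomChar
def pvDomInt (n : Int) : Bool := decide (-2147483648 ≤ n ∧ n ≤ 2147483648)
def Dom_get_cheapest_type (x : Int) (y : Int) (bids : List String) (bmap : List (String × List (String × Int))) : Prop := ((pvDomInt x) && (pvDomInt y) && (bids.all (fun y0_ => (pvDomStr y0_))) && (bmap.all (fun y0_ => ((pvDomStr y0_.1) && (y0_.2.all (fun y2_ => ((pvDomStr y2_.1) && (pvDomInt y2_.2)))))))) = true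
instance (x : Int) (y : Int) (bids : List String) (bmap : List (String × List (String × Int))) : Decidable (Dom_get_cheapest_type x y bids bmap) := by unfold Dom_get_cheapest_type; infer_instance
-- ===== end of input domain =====

-- B computes the two aggregates (total population, max squared distance) in one pass
-- over the buildings and then picks the minimum-cost type whose scalar specs cover them,
-- instead of A's per-type re-scan of all buildings.

-- ===== PORT A =====

def pvAntenna : PySem.Dict String (PySem.Dict String Int) := PySem.Dict.mk
  [ ("Nano",     PySem.Dict.mk [("range", 50),  ("capacity", 200),  ("cost_on", 5000)]),
    ("Spot",     PySem.Dict.mk [("range", 100), ("capacity", 800),  ("cost_on", 15000)]),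
    ("Density",  PySem.Dict.mk [("range", 150), ("capacity", 5000), ("cost_on", 30000)]),
    ("MaxRange", PySem.Dict.mk [("range", 400), ("capacity", 3500), ("cost_on", 40000)]) ]

def pvGetMaxPop (b : PySem.Dict String Int) : Int :=
  max (max (b.getD "populationPeakHours" 0) (b.getD "populationOffPeakHours" 0)) (b.getD "populationNight" 0)

def pvDistSq (x1 y1 x2 y2 : Int) : Int := (x1 - x2) ^ 2 + (y1 - y2) ^ 2

-- the 'for atype in [...]' loop with its 'continue' / early 'return'
def pvLoopA (x y tp : Int) (blds : List (PySem.Dict String Int)) : List String → Option String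
  | [] => none
  | t :: rest =>
    let specs := pvAntenna.getD t (PySem.Dict.mk [])
    if specs.getD "capacity" 0 < tp then pvLoopA x y tp blds rest
    else
      let r2 := (specs.getD "range" 0) ^ 2
      if blds.all (fun b => pvDistSq x y (b.getD "x" 0) (b.getD "y" 0) ≤ r2) then some t
      else pvLoopA x y tp blds rest

def get_cheapest_type (x : Int) (y : Int) (bids : List String) (bmap : List (String × List (String × Int))) : Option String :=
  let bd := PySem.Dict.mk bmap
  let blds := bids.map (fun bid => PySem.Dict.mk (bd.getD bid []))
  let total_pop := (blds.map pvGetMaxPop).sum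
  pvLoopA x y total_pop blds ["Nano", "Spot", "Density", "MaxRange"]

-- ===== PORT B =====

-- one aggregate pass: (total_pop, max_d2)
def pvAggStep (x y : Int) (bd : PySem.Dict String (List (String × Int))) (acc : Int × Int) (bid : String) : Int × Int :=
  let b := PySem.Dict.mk (bd.getD bid [])
  let d2 := pvDistSq x y (b.getD "x" 0) (b.getD "y" 0)
  (acc.1 + pvGetMaxPop b, if d2 > acc.2 then d2 else acc.2)

-- the 'for name, specs in ANTENNA_TYPES.items()' minimum-cost selection
def pvBest (tp md : Int) (best : Option (String × Int)) (p : String × PySem.Dict String Int) : Option (String × Int) :=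
  if p.2.getD "capacity" 0 ≥ tp ∧ (p.2.getD "range" 0) ^ 2 ≥ md then
    match best with
    | none => some (p.1, p.2.getD "cost_on" 0)
    | some b => if p.2.getD "cost_on" 0 < b.2 then some (p.1, p.2.getD "cost_on" 0) else some b
  else best

def get_cheapest_type_alt (x : Int) (y : Int) (bids : List String) (bmap : List (String × List (String × Int))) : Option String :=
  let bd := PySem.Dict.mk bmap
  let agg := bids.foldl (pvAggStep x y bd) (0, 0)
  (pvAntenna.items.foldl (pvBest agg.1 agg.2) none).map (·.1)

-- ===== PRECONDITION & SPEC =====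
-- Pre_ excludes inputs where some bid is missing from bmap or a referenced building dict
-- lacks one of the five required keys: there A usually raises KeyError (it can also return
-- None without ever touching 'x'/'y' when no type passes the capacity check), and B raises.
def Pre_get_cheapest_type (x : Int) (y : Int) (bids : List String) (bmap : List (String × List (String × Int))) : Prop :=
  (bids.all (fun bid =>
    match (PySem.Dict.mk bmap).get? bid with
    | none => false
    | some bl =>
      let b := PySem.Dict.mk bl
      b.contains "populationPeakHours" && b.contains "populationOffPeakHours" &&
      b.contains "populationNight" && b.contains "x" && b.contains "y")) = true
instance (x : Int) (y : Int) (bids : List String) (bmap : List (String × List (String × Int))) : Decidable (Pre_get_cheapest_type x y bids bmap) := by unfold Pre_get_cheapest_type; infer_instance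

def pvWitness_get_cheapest_type : Int × Int × List String × (List (String × List (String × Int))) :=
  (3, 4, ["a"], [("a", [("populationPeakHours", 10), ("populationOffPeakHours", 20), ("populationNight", 5), ("x", 0), ("y", 0)])])

def Spec_get_cheapest_type (x : Int) (y : Int) (bids : List String) (bmap : List (String × List (String × Int))) (out : Option String) : Prop := out = get_cheapest_type_alt x y bids bmap
instance (x : Int) (y : Int) (bids : List String) (bmap : List (String × List (String × Int))) (out : Option String) : Decidable (Spec_get_cheapest_type x y bids bmap out) := by unfold Spec_get_cheapest_type; infer_instance

-- ===== CLAIM (what is proved, stated in full; the proofs are below) =====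
def Claim_equal_get_cheapest_type : Prop := ∀ (x : Int) (y : Int) (bids : List String) (bmap : List (String × List (String × Int))), Dom_get_cheapest_type x y bids bmap → Pre_get_cheapest_type x y bids bmap → Spec_get_cheapest_type x y bids bmap (get_cheapest_type x y bids bmap)

-- ===== LEMMAS AND PROOFS =====

-- the running max is at least its initial value
theorem foldl_max_le_init (t : List (PySem.Dict String Int)) (m : Int) (f : PySem.Dict String Int → Int) :
    m ≤ t.foldl (fun m b => max m (f b)) m := by
  induction t generalizing m with
  | nil => simp
  | cons b t ih =>
    simp only [List.foldl_cons]
    exact le_trans (le_max_left _ _) (ih _)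

-- B's aggregate pass splits into A's population sum and a running max of squared distances
theorem agg_split (x y : Int) (bd : PySem.Dict String (List (String × Int))) :
    ∀ (bids : List String) (acc : Int × Int),
      bids.foldl (pvAggStep x y bd) acc =
        (acc.1 + ((bids.map (fun bid => PySem.Dict.mk (bd.getD bid []))).map pvGetMaxPop).sum,
         (bids.map (fun bid => PySem.Dict.mk (bd.getD bid []))).foldl
           (fun m b => max m (pvDistSq x y (b.getD "x" 0) (b.getD "y" 0))) acc.2) := by
  intro bids
  induction bids with
  | nil => intro acc; simp
  | cons h t ih =>
    intro acc
    simp only [List.foldl_cons, List.map_cons, List.sum_cons, ih, pvAggStep]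
    apply Prod.ext
    · simp only; ring
    · simp only
      congr 1
      simp only [max_def]
      split_ifs <;> omega

-- the 'all distances within r2' test is a comparison against the running max
theorem all_iff_max (x y r2 : Int) :
    ∀ (blds : List (PySem.Dict String Int)) (m : Int), m ≤ r2 →
      ((blds.all (fun b => pvDistSq x y (b.getD "x" 0) (b.getD "y" 0) ≤ r2)) = true ↔
        blds.foldl (fun m b => max m (pvDistSq x y (b.getD "x" 0) (b.getD "y" 0))) m ≤ r2) := by
  intro blds
  induction blds with
  | nil => intro m hm; simpa using hm
  | cons b t ih =>
    intro m hm
    simp only [List.all_cons, List.foldl_cons, Bool.and_eq_true, decide_eq_true_eq]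
    by_cases hb : pvDistSq x y (b.getD "x" 0) (b.getD "y" 0) ≤ r2
    · have h2 : max m (pvDistSq x y (b.getD "x" 0) (b.getD "y" 0)) ≤ r2 := max_le hm hb
      rw [ih _ h2]
      simp [hb]
    · constructor
      · rintro ⟨h, -⟩; exact absurd h hb
      · intro h
        have h1 := foldl_max_le_init t (max m (pvDistSq x y (b.getD "x" 0) (b.getD "y" 0)))
          (fun b => pvDistSq x y (b.getD "x" 0) (b.getD "y" 0))
        exact absurd (le_trans (le_max_right _ _) (le_trans h1 h)) hb

-- A's ordered four-type scan, reduced to scalar comparisons on (tp, md)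
set_option maxHeartbeats 1600000 in
theorem loopA_eval (x y tp md : Int) (blds : List (PySem.Dict String Int))
    (key : ∀ r2 : Int, 0 ≤ r2 →
      ((∀ b ∈ blds, pvDistSq x y (b.getD "x" 0) (b.getD "y" 0) ≤ r2) ↔ md ≤ r2)) :
    pvLoopA x y tp blds ["Nano", "Spot", "Density", "MaxRange"] =
      if tp ≤ 200 ∧ md ≤ 2500 then some "Nano"
      else if tp ≤ 800 ∧ md ≤ 10000 then some "Spot"
      else if tp ≤ 5000 ∧ md ≤ 22500 then some "Density"
      else if tp ≤ 3500 ∧ md ≤ 160000 then some "MaxRange"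
      else none := by
  have e1 : pvAntenna.getD "Nano" (PySem.Dict.mk []) =
      PySem.Dict.mk [("range", 50), ("capacity", 200), ("cost_on", 5000)] := by decide
  have e2 : pvAntenna.getD "Spot" (PySem.Dict.mk []) =
      PySem.Dict.mk [("range", 100), ("capacity", 800), ("cost_on", 15000)] := by decide
  have e3 : pvAntenna.getD "Density" (PySem.Dict.mk []) =
      PySem.Dict.mk [("range", 150), ("capacity", 5000), ("cost_on", 30000)] := by decide
  have e4 : pvAntenna.getD "MaxRange" (PySem.Dict.mk []) =
      PySem.Dict.mk [("range", 400), ("capacity", 3500), ("cost_on", 40000)] := by decide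
  have c1 : (PySem.Dict.mk [("range", (50:Int)), ("capacity", 200), ("cost_on", 5000)]).getD "capacity" 0 = 200 := by decide
  have c2 : (PySem.Dict.mk [("range", (100:Int)), ("capacity", 800), ("cost_on", 15000)]).getD "capacity" 0 = 800 := by decide
  have c3 : (PySem.Dict.mk [("range", (150:Int)), ("capacity", 5000), ("cost_on", 30000)]).getD "capacity" 0 = 5000 := by decide
  have c4 : (PySem.Dict.mk [("range", (400:Int)), ("capacity", 3500), ("cost_on", 40000)]).getD "capacity" 0 = 3500 := by decide
  have r1 : (PySem.Dict.mk [("range", (50:Int)), ("capacity", 200), ("cost_on", 5000)]).getD "range" 0 = 50 := by decide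
  have r2 : (PySem.Dict.mk [("range", (100:Int)), ("capacity", 800), ("cost_on", 15000)]).getD "range" 0 = 100 := by decide
  have r3 : (PySem.Dict.mk [("range", (150:Int)), ("capacity", 5000), ("cost_on", 30000)]).getD "range" 0 = 150 := by decide
  have r4 : (PySem.Dict.mk [("range", (400:Int)), ("capacity", 3500), ("cost_on", 40000)]).getD "range" 0 = 400 := by decide
  simp only [pvLoopA, e1, e2, e3, e4, c1, c2, c3, c4, r1, r2, r3, r4]
  norm_num
  simp only [key 2500 (by norm_num), key 10000 (by norm_num), key 22500 (by norm_num),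
    key 160000 (by norm_num)]
  split_ifs <;> first | rfl | omega

-- B's min-cost fold over the four types, reduced to the same scalar comparisons
theorem best_eval (tp md : Int) :
    (pvAntenna.items.foldl (pvBest tp md) none).map (·.1) =
      if tp ≤ 200 ∧ md ≤ 2500 then some "Nano"
      else if tp ≤ 800 ∧ md ≤ 10000 then some "Spot"
      else if tp ≤ 5000 ∧ md ≤ 22500 then some "Density"
      else if tp ≤ 3500 ∧ md ≤ 160000 then some "MaxRange"
      else none := by
  have hitems : pvAntenna.items =
      [ ("Nano",     PySem.Dict.mk [("range", 50),  ("capacity", 200),  ("cost_on", 5000)]),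
        ("Spot",     PySem.Dict.mk [("range", 100), ("capacity", 800),  ("cost_on", 15000)]),
        ("Density",  PySem.Dict.mk [("range", 150), ("capacity", 5000), ("cost_on", 30000)]),
        ("MaxRange", PySem.Dict.mk [("range", 400), ("capacity", 3500), ("cost_on", 40000)]) ] := rfl
  have c1 : (PySem.Dict.mk [("range", (50:Int)), ("capacity", 200), ("cost_on", 5000)]).getD "capacity" 0 = 200 := by decide
  have c2 : (PySem.Dict.mk [("range", (100:Int)), ("capacity", 800), ("cost_on", 15000)]).getD "capacity" 0 = 800 := by decide
  have c3 : (PySem.Dict.mk [("range", (150:Int)), ("capacity", 5000), ("cost_on", 30000)]).getD "capacity" 0 = 5000 := by decide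
  have c4 : (PySem.Dict.mk [("range", (400:Int)), ("capacity", 3500), ("cost_on", 40000)]).getD "capacity" 0 = 3500 := by decide
  have r1 : (PySem.Dict.mk [("range", (50:Int)), ("capacity", 200), ("cost_on", 5000)]).getD "range" 0 = 50 := by decide
  have r2 : (PySem.Dict.mk [("range", (100:Int)), ("capacity", 800), ("cost_on", 15000)]).getD "range" 0 = 100 := by decide
  have r3 : (PySem.Dict.mk [("range", (150:Int)), ("capacity", 5000), ("cost_on", 30000)]).getD "range" 0 = 150 := by decide
  have r4 : (PySem.Dict.mk [("range", (400:Int)), ("capacity", 3500), ("cost_on", 40000)]).getD "range" 0 = 400 := by decide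
  have o1 : (PySem.Dict.mk [("range", (50:Int)), ("capacity", 200), ("cost_on", 5000)]).getD "cost_on" 0 = 5000 := by decide
  have o2 : (PySem.Dict.mk [("range", (100:Int)), ("capacity", 800), ("cost_on", 15000)]).getD "cost_on" 0 = 15000 := by decide
  have o3 : (PySem.Dict.mk [("range", (150:Int)), ("capacity", 5000), ("cost_on", 30000)]).getD "cost_on" 0 = 30000 := by decide
  have o4 : (PySem.Dict.mk [("range", (400:Int)), ("capacity", 3500), ("cost_on", 40000)]).getD "cost_on" 0 = 40000 := by decide
  rw [hitems]
  simp only [List.foldl, pvBest, c1, c2, c3, c4, r1, r2, r3, r4, o1, o2, o3, o4]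
  norm_num
  split_ifs <;> rfl

-- ===== VERDICT (by name: the statement is the Claim_ definition above) =====
theorem get_cheapest_type_spec : Claim_equal_get_cheapest_type := by
  intro x y bids bmap _ _
  unfold Spec_get_cheapest_type get_cheapest_type get_cheapest_type_alt
  dsimp only
  rw [agg_split]
  dsimp only
  set bd := PySem.Dict.mk bmap
  set blds := bids.map (fun bid => PySem.Dict.mk (bd.getD bid []))
  set md := blds.foldl (fun m b => max m (pvDistSq x y (b.getD "x" 0) (b.getD "y" 0))) 0 with hmd
  have key : ∀ r2 : Int, 0 ≤ r2 →
      ((∀ b ∈ blds, pvDistSq x y (b.getD "x" 0) (b.getD "y" 0) ≤ r2) ↔ md ≤ r2) := by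
    intro r2 h0
    rw [← all_iff_max x y r2 blds 0 h0]
    simp
  rw [loopA_eval x y _ md blds key, best_eval]
  norm_num
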